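-- pv_equiv track=rewrite | github.com/joyshmitz/franken_node | scripts/lint_cross_track_references.py | extract_objective_text
-- ===== SOURCE A (Python) =====
-- BOILERPLATE_HEADERS = [
--     "testing & logging requirements",
--     "task-specific clarification",
--     "expected artifacts",
-- ]
--
-- def extract_objective_text(description: str) -> str:
--     """Extract objective/scope text, stripping boilerplate testing sections.
--
--     Bead descriptions follow a structured template where the top portion
--     (Task Objective, In Scope, Acceptance Criteria) contains the real
--     integration semantics, while the bottom sections (Testing & Logging,
--     Task-Specific Clarification, Expected Artifacts) contain boilerplate
--     that falsely matches integration keywords like 'integration tests'.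
--     """
--     lines = description.split("\n")
--     objective_lines = []
--     in_boilerplate = False
--
--     for line in lines:
--         stripped = line.strip().lower().rstrip(":")
--         if any(stripped.startswith(h) for h in BOILERPLATE_HEADERS):
--             in_boilerplate = True
--         elif stripped and not stripped[0].isspace() and stripped.endswith(":"):
--             # A new top-level header that isn't boilerplate restores scanning
--             # (handles rare cases of sections after boilerplate)
--             pass
--         if not in_boilerplate:
--             objective_lines.append(line)
--
--     return "\n".join(objective_lines)
-- ===== SOURCE B (Python) =====
-- BOILERPLATE_HEADERS = [
--     "testing & logging requirements",
--     "task-specific clarification",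
--     "expected artifacts",
-- ]
--
--
-- def _first_match(norm_lines, header):
--     """Index of the first normalized line that starts with header, or None."""
--     for i, text in enumerate(norm_lines):
--         if text.startswith(header):
--             return i
--     return None
--
--
-- def extract_objective_text(description: str) -> str:
--     """Staged passes: normalize every line once, locate each boilerplate
--     header's first occurrence independently, cut at the earliest hit."""
--     lines = description.split("\n")
--     norm = [line.strip().lower().rstrip(":") for line in lines]
--     hits = [_first_match(norm, h) for h in BOILERPLATE_HEADERS]
--     cutoff = min((i for i in hits if i is not None), default=len(lines))
--     return "\n".join(lines[:cutoff])
-- ===== Notes on version B (the rewrite author's own statement) =====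
-- stated objective: alternative
-- what changed: Replaces A's single stateful line-major pass (sticky in_boilerplate flag, per-line any(headers) test and conditional append) with staged passes: normalize all lines once, scan for each header independently (header-major) to get its first match index, take the minimum of those indices as the cutoff, and join the slice above it.
import Mathlib
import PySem

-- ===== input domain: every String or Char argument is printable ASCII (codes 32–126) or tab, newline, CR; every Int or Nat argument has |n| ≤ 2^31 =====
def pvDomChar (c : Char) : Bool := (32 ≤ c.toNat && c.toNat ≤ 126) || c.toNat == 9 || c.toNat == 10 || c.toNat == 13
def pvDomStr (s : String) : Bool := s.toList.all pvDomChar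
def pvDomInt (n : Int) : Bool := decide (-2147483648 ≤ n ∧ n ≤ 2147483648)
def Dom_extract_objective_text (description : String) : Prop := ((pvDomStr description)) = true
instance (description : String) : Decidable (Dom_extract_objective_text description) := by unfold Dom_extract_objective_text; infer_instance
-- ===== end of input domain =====

-- B replaces A's stateful line-major pass with staged passes (normalize all lines; per-header
-- first-match scans; min of the hit indices as cutoff; slice and join); objective: alternative.

-- ===== PORT A =====
-- shared context: BOILERPLATE_HEADERS
def pvBoilerplateHeaders : List (List Char) :=
  ["testing & logging requirements".toList,
   "task-specific clarification".toList,
   "expected artifacts".toList]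

-- line.strip().lower().rstrip(":"): rstrip(":") ported by hand (drop trailing ':' chars; exact)
def pvNormLine (line : List Char) : List Char :=
  ((PySem.Chars.lower (PySem.Chars.strip line)).reverse.dropWhile (· == ':')).reverse

-- the body of A's for-loop: state = (objective_lines, in_boilerplate)
def pvStepA (st : List (List Char) × Bool) (line : List Char) : List (List Char) × Bool :=
  let stripped := pvNormLine line
  let inB :=
    if pvBoilerplateHeaders.any (fun h => PySem.Chars.startswith stripped h) then true
    else if stripped ≠ [] ∧ ¬ (PySem.Chars.isspace (stripped.headD ' ')) ∧
              PySem.Chars.endswith stripped [':'] then st.2  -- Python: pass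
    else st.2
  (if inB then st.1 else st.1 ++ [line], inB)

def extract_objective_text (description : String) : String :=
  let lines := PySem.Chars.splitOn description.toList "\n".toList
  let res := lines.foldl pvStepA ([], false)
  String.ofList (PySem.Chars.join "\n".toList res.1)

-- ===== PORT B =====
-- Source B's _first_match: enumerate loop returning the first matching index, else None
def pvFirstMatch (norm_lines : List (List Char)) (header : List Char) : Option Nat :=
  match norm_lines with
  | [] => none
  | text :: rest =>
    if PySem.Chars.startswith text header then some 0
    else (pvFirstMatch rest header).map (· + 1)

def extract_objective_text_alt (description : String) : String :=
  let lines := PySem.Chars.splitOn description.toList "\n".toList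
  let norm := lines.map pvNormLine
  let hits := pvBoilerplateHeaders.map (fun h => pvFirstMatch norm h)
  let cutoff := ((hits.filterMap id).min?).getD lines.length  -- min(…, default=len(lines))
  String.ofList (PySem.Chars.join "\n".toList (lines.take cutoff))

-- ===== PRECONDITION & SPEC =====
def Spec_extract_objective_text (description : String) (out : String) : Prop := out = extract_objective_text_alt description
instance (description : String) (out : String) : Decidable (Spec_extract_objective_text description out) := by unfold Spec_extract_objective_text; infer_instance

-- ===== CLAIM (what is proved, stated in full; the proofs are below) =====
def Claim_equal_extract_objective_text : Prop := ∀ (description : String), Dom_extract_objective_text description → Spec_extract_objective_text description (extract_objective_text description)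

-- ===== LEMMAS AND PROOFS =====

-- proof-only characterisation of the cutoff: first line some header matches, else length
def pvCutW (H : List (List Char)) : List (List Char) → Nat
  | [] => 0
  | l :: rest =>
    if H.any (fun h => PySem.Chars.startswith (pvNormLine l) h) then 0
    else pvCutW H rest + 1

-- once in_boilerplate is true it stays true and nothing more is appended
lemma pvFoldA_true (lines : List (List Char)) (acc : List (List Char)) :
    lines.foldl pvStepA (acc, true) = (acc, true) := by
  induction lines with
  | nil => rfl
  | cons l rest ih =>
    simp only [List.foldl_cons]
    have : pvStepA (acc, true) l = (acc, true) := by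
      unfold pvStepA; dsimp only; split_ifs <;> simp_all
    rw [this, ih]

-- while the flag is false, A's accumulator is acc ++ the lines before the cutoff
lemma pvFoldA_false (lines : List (List Char)) (acc : List (List Char)) :
    (lines.foldl pvStepA (acc, false)).1 = acc ++ lines.take (pvCutW pvBoilerplateHeaders lines) := by
  induction lines generalizing acc with
  | nil => simp
  | cons l rest ih =>
    simp only [List.foldl_cons]
    by_cases hb : pvBoilerplateHeaders.any (fun h => PySem.Chars.startswith (pvNormLine l) h)
    · have hstep : pvStepA (acc, false) l = (acc, true) := by
        unfold pvStepA; dsimp only; simp [hb]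
      rw [hstep, pvFoldA_true]
      simp [pvCutW, hb]
    · have hstep : pvStepA (acc, false) l = (acc ++ [l], false) := by
        unfold pvStepA; dsimp only; split_ifs <;> simp_all
      rw [hstep, ih]
      simp [pvCutW, hb]

lemma pvMin0 (l : List Nat) (d : Nat) (h : 0 ∈ l) : (l.min?).getD d = 0 :=
  Nat.le_zero.mp (List.min?_getD_le_of_mem h)

lemma pvMinMapSucc (l : List Nat) : (l.map (· + 1)).min? = l.min?.map (· + 1) := by
  induction l with
  | nil => rfl
  | cons x xs ih =>
    simp only [List.map_cons, List.min?_cons, ih]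
    cases xs.min? <;> simp

-- the min of the per-header first-match indices is exactly pvCutW
lemma pvCut_min (H : List (List Char)) (lines : List (List Char)) :
    (((H.map (fun h => pvFirstMatch (lines.map pvNormLine) h)).filterMap id).min?).getD
      lines.length = pvCutW H lines := by
  induction lines with
  | nil =>
    simp [pvFirstMatch, pvCutW, List.filterMap_map]
  | cons l rest ih =>
    by_cases hb : H.any (fun h => PySem.Chars.startswith (pvNormLine l) h)
    · obtain ⟨h0, hmem, hsw⟩ := List.any_eq_true.mp hb
      have h0eq : pvFirstMatch ((l :: rest).map pvNormLine) h0 = some 0 := by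
        simp [pvFirstMatch, hsw]
      have : (0 : Nat) ∈ (H.map (fun h => pvFirstMatch ((l :: rest).map pvNormLine) h)).filterMap id := by
        simp only [List.filterMap_map]
        exact List.mem_filterMap.mpr ⟨h0, hmem, by simpa [Function.comp] using h0eq⟩
      rw [pvMin0 _ _ this]
      simp [pvCutW, hb]
    · have hnone : ∀ h ∈ H, ¬ PySem.Chars.startswith (pvNormLine l) h = true := by
        intro h hm
        exact fun hc => hb (List.any_eq_true.mpr ⟨h, hm, hc⟩)
      have hmap : H.map (fun h => pvFirstMatch ((l :: rest).map pvNormLine) h)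
          = H.map (fun h => (pvFirstMatch (rest.map pvNormLine) h).map (· + 1)) := by
        apply List.map_congr_left
        intro h hm
        simp [pvFirstMatch, hnone h hm]
      rw [hmap]
      have hfm : (H.map (fun h => (pvFirstMatch (rest.map pvNormLine) h).map (· + 1))).filterMap id
          = ((H.map (fun h => pvFirstMatch (rest.map pvNormLine) h)).filterMap id).map (· + 1) := by
        simp [List.filterMap_map, List.map_filterMap, Function.comp]
      rw [hfm, pvMinMapSucc]
      rw [show pvCutW H (l :: rest) = pvCutW H rest + 1 by simp [pvCutW, hb]]
      rw [← ih]
      cases ((H.map (fun h => pvFirstMatch (rest.map pvNormLine) h)).filterMap id).min? <;> simp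

-- ===== VERDICT (by name: the statement is the Claim_ definition above) =====
theorem extract_objective_text_spec : Claim_equal_extract_objective_text := by
  intro description _
  show _ = _
  simp only [extract_objective_text, extract_objective_text_alt]
  rw [pvFoldA_false, pvCut_min]
  simp
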